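-- pv_equiv track=rewrite | github.com/Idotopaz/Afeka-python | Home Work/Task 6/successive_number.py | create_successive_number
-- ===== SOURCE A (Python) =====
-- def create_successive_number(num):
--     total=0
--     pose=1
--
--     while num>0:
--         if (num%10)==9:
--             total+= 0 * pose
--             pose*=10
--         else:
--             total+=((num%10)+1)*pose
--             pose*=10
--         num//=10
--     return total
-- ===== SOURCE B (Python) =====
-- def create_successive_number(num):
--     if num <= 0:
--         return 0
--     return (num % 10 + 1) % 10 + 10 * create_successive_number(num // 10)
-- ===== Notes on version B (the rewrite author's own statement) =====
-- stated objective: simpler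
-- what changed: Replaces the iterative loop that maintains a running total and an explicit place-value multiplier 'pose' with a direct structural recursion on the quotient that combines the incremented low digit (wrapping to zero) with ten times the recursive result, removing both accumulator variables and the special-case branch.
import Mathlib
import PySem

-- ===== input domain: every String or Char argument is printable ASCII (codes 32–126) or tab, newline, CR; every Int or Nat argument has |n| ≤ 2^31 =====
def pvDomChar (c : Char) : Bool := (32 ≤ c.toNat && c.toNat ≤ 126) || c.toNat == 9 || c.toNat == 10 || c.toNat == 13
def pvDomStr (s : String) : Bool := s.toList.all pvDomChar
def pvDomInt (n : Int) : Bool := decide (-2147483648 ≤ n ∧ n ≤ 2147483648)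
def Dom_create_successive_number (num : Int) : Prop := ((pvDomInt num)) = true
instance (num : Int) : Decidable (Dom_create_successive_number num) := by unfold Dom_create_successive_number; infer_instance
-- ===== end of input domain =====

-- B replaces A's while-loop with a running total and place-value multiplier by a direct
-- structural recursion on num // 10 (same values, no accumulators); return-value equivalence.

-- ===== PORT A =====
-- while loop over state (num, total, pose), transliterated branch for branch
def csnLoop (num total pose : Int) : Int :=
  if _h : num > 0 then
    if PySem.Int.mod num 10 == 9 then
      csnLoop (PySem.Int.floordiv num 10) (total + 0 * pose) (pose * 10)
    else
      csnLoop (PySem.Int.floordiv num 10) (total + (PySem.Int.mod num 10 + 1) * pose) (pose * 10)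
  else total
termination_by num.toNat
decreasing_by all_goals (rw [PySem.Int.floordiv_eq_ediv_of_pos (by norm_num)]; omega)

def create_successive_number (num : Int) : Int := csnLoop num 0 1

-- ===== PORT B =====
def create_successive_number_alt (num : Int) : Int :=
  if _h : num ≤ 0 then 0
  else PySem.Int.mod (PySem.Int.mod num 10 + 1) 10
       + 10 * create_successive_number_alt (PySem.Int.floordiv num 10)
termination_by num.toNat
decreasing_by rw [PySem.Int.floordiv_eq_ediv_of_pos (by norm_num)]; omega

-- ===== PRECONDITION & SPEC =====
def Spec_create_successive_number (num : Int) (out : Int) : Prop := out = create_successive_number_alt num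
instance (num : Int) (out : Int) : Decidable (Spec_create_successive_number num out) := by unfold Spec_create_successive_number; infer_instance

-- ===== CLAIM (what is proved, stated in full; the proofs are below) =====
def Claim_equal_create_successive_number : Prop := ∀ (num : Int), Dom_create_successive_number num → Spec_create_successive_number num (create_successive_number num)

-- ===== LEMMAS AND PROOFS =====

theorem csnLoop_eq (num total pose : Int) :
    csnLoop num total pose = total + pose * create_successive_number_alt num := by
  rw [csnLoop, create_successive_number_alt]
  by_cases h : num > 0
  · have hd0 : 0 ≤ PySem.Int.mod num 10 := PySem.Int.mod_nonneg num (by norm_num)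
    have hd9 : PySem.Int.mod num 10 < 10 := PySem.Int.mod_lt num (by norm_num)
    by_cases h9 : PySem.Int.mod num 10 = 9
    · simp only [h, h9, dif_pos, if_pos, beq_self_eq_true, dif_neg (by omega : ¬ num ≤ 0)]
      rw [csnLoop_eq (PySem.Int.floordiv num 10)]
      have : PySem.Int.mod (9 + 1 : Int) 10 = 0 := by decide
      rw [this]
      ring
    · simp only [h, dif_pos, beq_iff_eq, h9, if_neg, not_false_iff,
        dif_neg (by omega : ¬ num ≤ 0)]
      rw [csnLoop_eq (PySem.Int.floordiv num 10)]
      have : PySem.Int.mod (PySem.Int.mod num 10 + 1) 10 = PySem.Int.mod num 10 + 1 := by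
        rw [PySem.Int.mod_eq_emod_of_pos (by norm_num)]
        exact Int.emod_eq_of_lt (by omega) (by omega)
      rw [this]
      ring
  · simp only [h, dif_neg, not_false_iff, dif_pos (by omega : num ≤ 0)]
    ring
termination_by num.toNat
decreasing_by all_goals (rw [PySem.Int.floordiv_eq_ediv_of_pos (by norm_num)]; omega)

-- ===== VERDICT (by name: the statement is the Claim_ definition above) =====
theorem create_successive_number_spec : Claim_equal_create_successive_number := by
  intro num _
  unfold Spec_create_successive_number create_successive_number
  rw [csnLoop_eq]
  ring
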